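-- pv_equiv track=rewrite | github.com/fedora-infra/fedora-packages | fedoracommunity/connectors/xapianconnector.py | _highlight_str
-- ===== SOURCE A (Python) =====
-- def _highlight_str(string, term):
--     # we are injecting html so url escape the origional string
--     # to avoid an html injection attack from the packages themselves
--     # string = cgi.escape(string)
--     lc_string = string.lower()
--     term = term.lower()
--     term_len = len(term)
--     result = ''
--
--     i = lc_string.find(term, 0)
--     start = 0
--     while i != -1:
--         result += string[start:i] + '<span class="match">'
--         start = i + term_len
--         result += string[i:start] + '</span>'
--         i = lc_string.find(term, start)
--
--     result += string[start:]
--     return result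
-- ===== SOURCE B (Python) =====
-- def _highlight_str(string, term):
--     lc_string = string.lower()
--     term = term.lower()
--     term_len = len(term)
--     parts = lc_string.split(term)
--     pieces = []
--     offset = 0
--     for k, part in enumerate(parts):
--         pieces.append(string[offset:offset + len(part)])
--         offset += len(part)
--         if k < len(parts) - 1:
--             pieces.append('<span class="match">' + string[offset:offset + term_len] + '</span>')
--             offset += term_len
--     return ''.join(pieces)
-- ===== Notes on version B (the rewrite author's own statement) =====
-- stated objective: alternative
-- what changed: Replaces A's index-tracking while loop over lc_string.find(term, start) with a split of the lowercased string on the lowercased term, then a single offset-walk over the parts that slices the matched and unmatched segments out of the original string.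
import Mathlib
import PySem

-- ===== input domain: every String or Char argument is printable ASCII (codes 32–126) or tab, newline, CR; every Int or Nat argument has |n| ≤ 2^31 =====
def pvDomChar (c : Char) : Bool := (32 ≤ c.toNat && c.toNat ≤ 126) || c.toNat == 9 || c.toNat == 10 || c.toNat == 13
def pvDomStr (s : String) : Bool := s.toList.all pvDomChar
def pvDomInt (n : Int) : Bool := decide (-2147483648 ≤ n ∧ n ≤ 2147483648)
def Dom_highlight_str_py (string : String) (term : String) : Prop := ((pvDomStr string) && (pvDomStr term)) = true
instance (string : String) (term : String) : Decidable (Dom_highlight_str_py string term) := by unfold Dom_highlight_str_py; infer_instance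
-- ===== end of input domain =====

-- B replaces A's index-tracking find/while loop by splitting the lowercased string on the
-- lowercased term and walking the original string with a running offset (different decomposition).


def pvOpen : List Char := "<span class=\"match\">".toList
def pvClose : List Char := "</span>".toList

-- ===== PORT A =====
-- A's while loop: i = lc_string.find(term, start); by PySem.Chars.findFrom_natCast this equals
-- start + find(lc_string[start:], term), so the loop is transcribed as the same loop over the
-- remaining suffixes (state = suffix of string / lc_string at position `start`, accumulated result).
-- The `term = []` guard only makes the recursion total: Python A loops forever there (outside Pre_).
def pvALoop (orig lcs term : List Char) : List Char :=
  if hterm : term = [] then orig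
  else
    let j := PySem.Chars.find lcs term
    if hj : j < 0 then orig
    else
      orig.take j.toNat ++ pvOpen ++ (orig.drop j.toNat).take term.length ++ pvClose
        ++ pvALoop (orig.drop (j.toNat + term.length)) (lcs.drop (j.toNat + term.length)) term
termination_by lcs.length
decreasing_by
  have hnn : (0:Int) ≤ PySem.Chars.find lcs term := by omega
  have hinf : term <:+: lcs := (PySem.Chars.find_nonneg_iff lcs term).mp hnn
  have h1 : term.length ≤ lcs.length := hinf.length_le
  have h2 : 0 < term.length := List.length_pos_iff.mpr hterm
  simp only [List.length_drop]
  omega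

def highlight_str_py (string : String) (term : String) : String :=
  let lc_string := PySem.Str.lower string
  let t := PySem.Str.lower term
  String.ofList (pvALoop string.toList lc_string.toList t.toList)

-- ===== PORT B =====
-- Source B's for-loop over enumerate(parts): `[p]` is the last part (k = len(parts)-1); the slices
-- string[offset:offset+n] (offset ≥ 0) are (orig.drop offset).take n, exact for nonnegative bounds.
def pvBWalk (orig : List Char) (tl : Nat) : List (List Char) → Nat → List Char
  | [], _ => []
  | [p], off => (orig.drop off).take p.length
  | p :: q :: rest, off =>
      (orig.drop off).take p.length ++ pvOpen ++ (orig.drop (off + p.length)).take tl ++ pvClose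
        ++ pvBWalk orig tl (q :: rest) (off + p.length + tl)

-- lc_string.split(term): PySem.Chars.splitOn is the sep ≠ "" form (Pre_ excludes term = "",
-- where Source B's split raises ValueError).
def highlight_str_py_alt (string : String) (term : String) : String :=
  let lc_string := PySem.Str.lower string
  let t := PySem.Str.lower term
  let parts := PySem.Chars.splitOn lc_string.toList t.toList
  String.ofList (pvBWalk string.toList t.toList.length parts 0)

-- ===== PRECONDITION & SPEC =====
-- Pre_ excludes only the empty term, on which A's while loop never terminates (and B's split raises ValueError).
def Pre_highlight_str_py (string : String) (term : String) : Prop := term ≠ ""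
instance (string : String) (term : String) : Decidable (Pre_highlight_str_py string term) := by unfold Pre_highlight_str_py; infer_instance
def pvWitness_highlight_str_py : String × String := ("Hello hello world", "hell")

def Spec_highlight_str_py (string : String) (term : String) (out : String) : Prop := out = highlight_str_py_alt string term
instance (string : String) (term : String) (out : String) : Decidable (Spec_highlight_str_py string term out) := by unfold Spec_highlight_str_py; infer_instance

-- ===== CLAIM (what is proved, stated in full; the proofs are below) =====
def Claim_equal_highlight_str_py : Prop := ∀ (string : String) (term : String), Dom_highlight_str_py string term → Pre_highlight_str_py string term → Spec_highlight_str_py string term (highlight_str_py string term)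

-- ===== LEMMAS AND PROOFS =====

-- suffix form of B's walk (proof-side only)
def pvBW2 (tl : Nat) : List Char → List (List Char) → List Char
  | _, [] => []
  | s, [p] => s.take p.length
  | s, p :: q :: rest =>
      s.take p.length ++ pvOpen ++ (s.drop p.length).take tl ++ pvClose
        ++ pvBW2 tl (s.drop (p.length + tl)) (q :: rest)

lemma pvBWalk_eq_BW2 (tl : Nat) (parts : List (List Char)) :
    ∀ (orig : List Char) (off : Nat), pvBWalk orig tl parts off = pvBW2 tl (orig.drop off) parts := by
  induction parts with
  | nil => intro orig off; rfl
  | cons p rest ih =>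
      intro orig off
      cases rest with
      | nil => rfl
      | cons q rest' =>
          simp only [pvBWalk, pvBW2, ih orig (off + p.length + tl), List.drop_drop]
          ring_nf

-- one step of splitOn.go on a cons (its own equation, by rfl)
lemma pvGo_succ (sep : List Char) (f : Nat) (c : Char) (rest cur : List Char) (acc : List (List Char)) :
    PySem.Chars.splitOn.go sep (f+1) (c::rest) cur acc
      = if sep.isPrefixOf (c::rest) = true
        then PySem.Chars.splitOn.go sep f (List.drop sep.length (c::rest)) [] (cur.reverse :: acc)
        else PySem.Chars.splitOn.go sep f rest (c :: cur) acc := rfl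

-- the acc / cur accumulators of splitOn.go factor out
lemma pvGo_extract (sep : List Char) :
    ∀ (fuel : Nat) (l cur : List Char) (acc : List (List Char)),
      PySem.Chars.splitOn.go sep fuel l cur acc
        = acc.reverse ++ List.modifyHead (cur.reverse ++ ·) (PySem.Chars.splitOn.go sep fuel l [] []) := by
  intro fuel
  induction fuel with
  | zero => intro l cur acc; simp [PySem.Chars.splitOn.go]
  | succ f ih =>
      intro l cur acc
      cases l with
      | nil => simp [PySem.Chars.splitOn.go]
      | cons c rest =>
          rw [pvGo_succ, pvGo_succ]
          split
          · rw [ih _ [] (cur.reverse :: acc), ih _ [] ([].reverse :: [])]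
            simp
          · rw [ih rest (c :: cur) acc, ih rest [c] []]
            simp [List.modifyHead_modifyHead]
            cases PySem.Chars.splitOn.go sep f rest [] [] <;> simp

-- splitOn.go does not depend on the fuel once it covers the list length (sep ≠ [])
lemma pvGo_fuel (sep : List Char) (hsep : sep ≠ []) :
    ∀ (n : Nat) (l : List Char), l.length ≤ n → ∀ (fuel fuel' : Nat) (cur : List Char) (acc : List (List Char)),
      l.length ≤ fuel → l.length ≤ fuel' →
      PySem.Chars.splitOn.go sep fuel l cur acc = PySem.Chars.splitOn.go sep fuel' l cur acc := by
  intro n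
  induction n with
  | zero =>
      intro l hl fuel fuel' cur acc h1 h2
      have : l = [] := List.eq_nil_of_length_eq_zero (Nat.le_zero.mp hl)
      subst this
      cases fuel <;> cases fuel' <;> simp [PySem.Chars.splitOn.go]
  | succ m ih =>
      intro l hl fuel fuel' cur acc h1 h2
      cases l with
      | nil => cases fuel <;> cases fuel' <;> simp [PySem.Chars.splitOn.go]
      | cons c rest =>
          simp only [List.length_cons] at hl h1 h2
          obtain ⟨f, rfl⟩ : ∃ f, fuel = f + 1 := ⟨fuel - 1, by omega⟩
          obtain ⟨f', rfl⟩ : ∃ f', fuel' = f' + 1 := ⟨fuel' - 1, by omega⟩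
          rw [pvGo_succ, pvGo_succ]
          have hs : 0 < sep.length := List.length_pos_iff.mpr hsep
          split
          · apply ih <;> simp_all <;> omega
          · apply ih <;> simp_all

-- find.go at offset k is find.go at 0 shifted by k
lemma pvFindGo_shift (sub : List Char) :
    ∀ (l : List Char) (k : Nat), PySem.Chars.find.go sub l k
      = if PySem.Chars.find.go sub l 0 < 0 then -1 else PySem.Chars.find.go sub l 0 + k := by
  intro l
  induction l with
  | nil => intro k; by_cases h : sub.isEmpty <;> simp [PySem.Chars.find.go, h]
  | cons c rest ih =>
      intro k
      rw [show PySem.Chars.find.go sub (c::rest) k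
            = (if sub.isPrefixOf (c::rest) = true then (k:Int) else PySem.Chars.find.go sub rest (k+1)) from rfl,
          show PySem.Chars.find.go sub (c::rest) 0
            = (if sub.isPrefixOf (c::rest) = true then (0:Int) else PySem.Chars.find.go sub rest (0+1)) from rfl]
      split
      · simp
      · rw [ih (k+1), ih (0+1)]
        split <;> split_ifs <;> push_cast <;> omega

-- splitOn unfolds along the first occurrence of sep (the shape B's walk consumes)
lemma pvSplitOn_eq (sep : List Char) (hsep : sep ≠ []) :
    ∀ (l : List Char),
      PySem.Chars.splitOn l sep
        = if PySem.Chars.find l sep < 0 then [l]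
          else l.take (PySem.Chars.find l sep).toNat
                :: PySem.Chars.splitOn (l.drop ((PySem.Chars.find l sep).toNat + sep.length)) sep := by
  intro l
  induction l with
  | nil =>
      have hf : PySem.Chars.find ([] : List Char) sep = -1 := by
        simp [PySem.Chars.find, PySem.Chars.find.go, List.isEmpty_iff, hsep]
      simp [hf, PySem.Chars.splitOn, PySem.Chars.splitOn.go]
  | cons c rest ih =>
      have hs : 0 < sep.length := List.length_pos_iff.mpr hsep
      have hfind : PySem.Chars.find (c::rest) sep
          = (if sep.isPrefixOf (c::rest) = true then (0:Int)
             else (if PySem.Chars.find rest sep < 0 then -1 else PySem.Chars.find rest sep + 1)) := by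
        rw [show PySem.Chars.find (c::rest) sep
              = (if sep.isPrefixOf (c::rest) = true then (0:Int) else PySem.Chars.find.go sep rest (0+1)) from rfl]
        rw [pvFindGo_shift sep rest (0+1)]
        rfl
      rw [show PySem.Chars.splitOn (c::rest) sep
            = PySem.Chars.splitOn.go sep ((rest.length+1)+1) (c::rest) [] [] from rfl,
          pvGo_succ]
      by_cases hp : sep.isPrefixOf (c::rest) = true
      · rw [if_pos hp]
        set d := List.drop sep.length (c::rest) with hd
        have hdlen : d.length ≤ rest.length + 1 := by simp [hd]
        rw [pvGo_extract sep _ _ [] _,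
            pvGo_fuel sep hsep d.length d le_rfl _ (d.length + 1) [] [] hdlen (by omega),
            show PySem.Chars.splitOn.go sep (d.length+1) d [] [] = PySem.Chars.splitOn d sep from rfl]
        rw [hfind, if_pos hp]
        cases hsp : PySem.Chars.splitOn (List.drop sep.length (c :: rest)) sep <;> simp [hsp]
      · rw [if_neg hp]
        rw [pvGo_extract sep _ _ [c] [],
            pvGo_fuel sep hsep rest.length rest le_rfl _ (rest.length + 1) [] [] (by omega) (by omega),
            show PySem.Chars.splitOn.go sep (rest.length+1) rest [] [] = PySem.Chars.splitOn rest sep from rfl]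
        rw [hfind, if_neg hp, ih]
        by_cases hr : PySem.Chars.find rest sep < 0
        · simp [hr]
        · simp only [if_neg hr]
          rw [if_neg (by omega : ¬ (PySem.Chars.find rest sep + 1 < 0))]
          have : (PySem.Chars.find rest sep + 1).toNat = (PySem.Chars.find rest sep).toNat + 1 := by omega
          simp only [List.modifyHead, List.reverse_cons, List.reverse_nil, List.nil_append,
            List.singleton_append, this, List.take_succ_cons]
          rw [show (PySem.Chars.find rest sep).toNat + 1 + sep.length
                = ((PySem.Chars.find rest sep).toNat + sep.length) + 1 by ring,
              List.drop_succ_cons]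

lemma pvSplitOn_ne_nil (sep : List Char) (hsep : sep ≠ []) (l : List Char) :
    PySem.Chars.splitOn l sep ≠ [] := by
  rw [pvSplitOn_eq sep hsep l]; split <;> simp

-- main equivalence on the char level: A's loop = B's walk over splitOn
lemma pvMain (term : List Char) (hterm : term ≠ []) :
    ∀ (n : Nat) (lcs orig : List Char), lcs.length ≤ n → lcs.length = orig.length →
      pvALoop orig lcs term = pvBW2 term.length orig (PySem.Chars.splitOn lcs term) := by
  intro n
  induction n with
  | zero =>
      intro lcs orig hn hlen
      have h0 : lcs = [] := List.eq_nil_of_length_eq_zero (Nat.le_zero.mp hn)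
      subst h0
      have hf : PySem.Chars.find ([] : List Char) term = -1 := by
        simp [PySem.Chars.find, PySem.Chars.find.go, List.isEmpty_iff, hterm]
      rw [pvALoop, dif_neg hterm, pvSplitOn_eq term hterm]
      rw [dif_pos (by rw [hf]; norm_num), if_pos (by rw [hf]; norm_num)]
      simp only [pvBW2]
      exact ((List.eq_nil_of_length_eq_zero (by simpa using hlen.symm)).symm ▸ rfl)
  | succ m ih =>
      intro lcs orig hn hlen
      rw [pvALoop, dif_neg hterm, pvSplitOn_eq term hterm]
      by_cases hj : PySem.Chars.find lcs term < 0
      · rw [dif_pos hj, if_pos hj]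
        simp [pvBW2, hlen]
      · rw [dif_neg hj, if_neg hj]
        set j := (PySem.Chars.find lcs term).toNat with hjdef
        have hnn : (0:Int) ≤ PySem.Chars.find lcs term := by omega
        have hspec := PySem.Chars.find_spec (s := lcs) (sub := term) hnn
        have hjle : j + term.length ≤ lcs.length := by
          have := hspec.1.length_le
          simp only [List.length_drop] at this
          have hle : PySem.Chars.find lcs term ≤ lcs.length := PySem.Chars.find_le_length lcs term
          omega
        have htl : 0 < term.length := List.length_pos_iff.mpr hterm
        obtain ⟨q, rest, hS⟩ : ∃ q rest, PySem.Chars.splitOn (lcs.drop (j + term.length)) term = q :: rest := by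
          cases hS : PySem.Chars.splitOn (lcs.drop (j + term.length)) term with
          | nil => exact absurd hS (pvSplitOn_ne_nil term hterm _)
          | cons q rest => exact ⟨q, rest, rfl⟩
        rw [hS]
        have htake : (lcs.take j).length = j := by
          simp [List.length_take]; omega
        simp only [pvBW2, htake]
        have hih := ih (lcs.drop (j + term.length)) (orig.drop (j + term.length))
          (by simp; omega) (by simp [hlen])
        rw [hS] at hih
        rw [hih]

-- ===== VERDICT (by name: the statement is the Claim_ definition above) =====
theorem highlight_str_py_spec : Claim_equal_highlight_str_py := by
  intro s t _ hpre
  unfold Spec_highlight_str_py highlight_str_py highlight_str_py_alt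
  have htl : (PySem.Str.lower t).toList ≠ [] := by
    simp only [PySem.Str.toList_lower, PySem.Chars.lower]
    intro h
    exact hpre (String.toList_inj.mp (by simpa using h))
  have hlen : (PySem.Str.lower s).toList.length = s.toList.length := by
    simp [PySem.Str.toList_lower, PySem.Chars.lower]
  simp only [pvBWalk_eq_BW2, List.drop_zero]
  exact congrArg String.ofList
    (pvMain _ htl (PySem.Str.lower s).toList.length _ _ le_rfl (by rw [hlen]))
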